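-- pv_equiv track=rewrite | github.com/yunmengya/PHP_AUDIT_SKILLS | _scripts/debug_runner.py | classify_change
-- ===== SOURCE A (Python) =====
-- from typing import Any, Dict, List, Optional, Tuple
--
-- CHANGE_VALUES = {"no_change", "weak_change", "strong_change", "unknown"}
--
-- def classify_change(
--     input_val: str,
--     final_val: str,
--     transform_chain: List[str],
--     rules: Dict[str, List[str]],
--     explicit: str = "",
-- ) -> str:
--     if explicit in CHANGE_VALUES:
--         return explicit
--     if input_val == final_val:
--         return "no_change"
--     if transform_chain:
--         for item in transform_chain:
--             if item in rules.get("strong_change", []):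
--                 return "strong_change"
--         for item in transform_chain:
--             if item in rules.get("weak_change", []):
--                 return "weak_change"
--     return "weak_change"
-- ===== SOURCE B (Python) =====
-- from typing import Any, Dict, List, Optional, Tuple
--
-- CHANGE_VALUES = {"no_change", "weak_change", "strong_change", "unknown"}
--
-- def classify_change(
--     input_val: str,
--     final_val: str,
--     transform_chain: List[str],
--     rules: Dict[str, List[str]],
--     explicit: str = "",
-- ) -> str:
--     if explicit in CHANGE_VALUES:
--         return explicit
--     if input_val == final_val:
--         return "no_change"
--     # Index the strong rules once, then fold the chain to a numeric severity.
--     severity = {item: 2 for item in rules.get("strong_change", [])}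
--     best = 1
--     for item in transform_chain:
--         best = max(best, severity.get(item, 1))
--     return "strong_change" if best == 2 else "weak_change"
-- ===== Notes on version B (the rewrite author's own statement) =====
-- stated objective: alternative
-- what changed: B builds a hash index of the strong_change rules once and folds the chain to a max severity score (A's second weak_change loop is dead code since every non-strong path returns 'weak_change'); A instead scans the rule list for each chain item with early returns and then runs the redundant weak loop.
import Mathlib
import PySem

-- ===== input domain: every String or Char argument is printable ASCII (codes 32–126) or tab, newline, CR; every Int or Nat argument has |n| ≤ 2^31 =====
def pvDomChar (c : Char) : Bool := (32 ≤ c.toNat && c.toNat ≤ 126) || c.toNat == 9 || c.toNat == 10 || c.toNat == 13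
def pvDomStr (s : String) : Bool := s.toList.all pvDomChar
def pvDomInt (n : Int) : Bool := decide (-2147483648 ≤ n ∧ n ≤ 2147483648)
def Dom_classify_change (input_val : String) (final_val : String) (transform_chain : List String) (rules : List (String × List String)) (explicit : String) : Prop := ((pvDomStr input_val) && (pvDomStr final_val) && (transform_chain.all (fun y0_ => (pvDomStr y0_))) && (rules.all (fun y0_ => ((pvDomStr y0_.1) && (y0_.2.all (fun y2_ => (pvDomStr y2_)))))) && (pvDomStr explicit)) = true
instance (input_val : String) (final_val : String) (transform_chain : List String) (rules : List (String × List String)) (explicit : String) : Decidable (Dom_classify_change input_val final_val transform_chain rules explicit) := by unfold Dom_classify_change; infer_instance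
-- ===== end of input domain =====

-- B indexes the strong rules in a dict once and folds the chain to a max severity score
-- (A's second weak loop is dead code); same return value everywhere (objective: alternative).
-- ===== PORT A =====
def pvCHANGE_VALUES : List String := ["no_change", "weak_change", "strong_change", "unknown"]

-- A's first for-loop: returns some "strong_change" at the first item found in the strong list
def pvAStrongLoop (chain : List String) (strong : List String) : Option String :=
  match chain with
  | [] => none
  | item :: rest => if strong.contains item then some "strong_change" else pvAStrongLoop rest strong

-- A's second for-loop: returns some "weak_change" at the first item found in the weak list
def pvAWeakLoop (chain : List String) (weak : List String) : Option String :=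
  match chain with
  | [] => none
  | item :: rest => if weak.contains item then some "weak_change" else pvAWeakLoop rest weak

def classify_change (input_val : String) (final_val : String) (transform_chain : List String) (rules : List (String × List String)) (explicit : String) : String :=
  if pvCHANGE_VALUES.contains explicit then explicit
  else if input_val == final_val then "no_change"
  else if !transform_chain.isEmpty then
    match pvAStrongLoop transform_chain (PySem.Dict.getD (PySem.Dict.mk rules) "strong_change" []) with
    | some r => r
    | none =>
      match pvAWeakLoop transform_chain (PySem.Dict.getD (PySem.Dict.mk rules) "weak_change" []) with
      | some r => r
      | none => "weak_change"
  else "weak_change"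

-- ===== PORT B =====
def classify_change_alt (input_val : String) (final_val : String) (transform_chain : List String) (rules : List (String × List String)) (explicit : String) : String :=
  if pvCHANGE_VALUES.contains explicit then explicit
  else if input_val == final_val then "no_change"
  else
    -- severity = {item: 2 for item in rules.get("strong_change", [])}
    let severity : PySem.Dict String Int :=
      (PySem.Dict.getD (PySem.Dict.mk rules) "strong_change" []).foldl
        (fun d item => d.insert item 2) PySem.Dict.empty
    -- best = 1; for item in chain: best = max(best, severity.get(item, 1))
    let best : Int := transform_chain.foldl (fun b item => max b (severity.getD item 1)) 1
    if best == 2 then "strong_change" else "weak_change"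

-- ===== PRECONDITION & SPEC =====
def Spec_classify_change (input_val : String) (final_val : String) (transform_chain : List String) (rules : List (String × List String)) (explicit : String) (out : String) : Prop := out = classify_change_alt input_val final_val transform_chain rules explicit
instance (input_val : String) (final_val : String) (transform_chain : List String) (rules : List (String × List String)) (explicit : String) (out : String) : Decidable (Spec_classify_change input_val final_val transform_chain rules explicit out) := by unfold Spec_classify_change; infer_instance

-- ===== CLAIM =====
def Claim_equal_classify_change : Prop := ∀ (input_val : String) (final_val : String) (transform_chain : List String) (rules : List (String × List String)) (explicit : String), Dom_classify_change input_val final_val transform_chain rules explicit → Spec_classify_change input_val final_val transform_chain rules explicit (classify_change input_val final_val transform_chain rules explicit)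

-- ===== LEMMAS AND PROOFS =====

-- The severity dict maps exactly the strong items to 2.
lemma severity_getD (strong : List String) (d : PySem.Dict String Int) (item : String) :
    (strong.foldl (fun d it => d.insert it 2) d).getD item 1 =
      if strong.contains item then 2 else d.getD item 1 := by
  induction strong generalizing d with
  | nil => simp
  | cons s rest ih =>
    simp only [List.foldl_cons, List.contains_cons]
    rw [ih]
    by_cases h : item = s
    · subst h; simp
    · by_cases hm : item ∈ rest <;> simp [PySem.Dict.getD_insert, h, hm]

-- The max-fold from 1 equals 2 iff some chain item is strong, else 1.
lemma best_fold (chain : List String) (strong : List String) (d : PySem.Dict String Int)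
    (hsev : ∀ x, d.getD x 1 = if strong.contains x then 2 else 1) (b : Int) (hb : b = 1 ∨ b = 2) :
    chain.foldl (fun b item => max b (d.getD item 1)) b =
      if (b = 2 ∨ chain.any (fun item => strong.contains item)) then 2 else 1 := by
  induction chain generalizing b with
  | nil =>
    rcases hb with h | h <;> subst h <;> simp
  | cons c rest ih =>
    simp only [List.foldl_cons, List.any_cons]
    rw [hsev c]
    by_cases hc : strong.contains c = true
    · simp only [hc, if_true]
      have hmax : max b 2 = 2 := by rcases hb with h | h <;> subst h <;> decide
      rw [hmax, ih 2 (Or.inr rfl)]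
      simp
    · have hc' : strong.contains c = false := by simpa using hc
      simp only [hc', Bool.false_eq_true, if_false, Bool.false_or]
      have hmax : max b 1 = b := by rcases hb with h | h <;> subst h <;> decide
      rw [hmax, ih b hb]

lemma pvAStrongLoop_eq (chain strong : List String) :
    pvAStrongLoop chain strong =
      if chain.any (fun item => strong.contains item) then some "strong_change" else none := by
  induction chain with
  | nil => simp [pvAStrongLoop]
  | cons x xs ih =>
    by_cases h : x ∈ strong <;> simp [pvAStrongLoop, ih, h]

lemma pvAWeakLoop_weak (chain weak : List String) :
    (match pvAWeakLoop chain weak with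
     | some r => r
     | none => "weak_change") = "weak_change" := by
  induction chain with
  | nil => simp [pvAWeakLoop]
  | cons x xs ih =>
    by_cases h : x ∈ weak <;> simp [pvAWeakLoop, h, ih]

-- ===== VERDICT =====
theorem classify_change_spec : Claim_equal_classify_change := by
  intro input_val final_val transform_chain rules explicit _
  unfold Spec_classify_change classify_change classify_change_alt
  cases hb1 : pvCHANGE_VALUES.contains explicit with
  | true => simp only [if_true]
  | false =>
    cases hb2 : input_val == final_val with
    | true => simp only [Bool.false_eq_true, if_false, if_true]
    | false =>
      simp only [Bool.false_eq_true, if_false]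
      set strong := PySem.Dict.getD (PySem.Dict.mk rules) "strong_change" [] with hstrong
      have hsev : ∀ x,
          (strong.foldl (fun d it => d.insert it 2) (PySem.Dict.empty : PySem.Dict String Int)).getD x 1 =
            if strong.contains x then 2 else 1 := by
        intro x
        rw [severity_getD strong PySem.Dict.empty x]
        simp [PySem.Dict.getD, PySem.Dict.get?, PySem.Dict.empty]
      rw [best_fold transform_chain strong _ hsev 1 (Or.inl rfl)]
      simp only [show ¬((1:Int)=2) by decide, false_or]
      cases transform_chain with
      | nil => simp
      | cons a l =>
        simp only [List.isEmpty_cons, Bool.not_false, if_true]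
        rw [pvAStrongLoop_eq]
        cases hb3 : (a :: l).any (fun item => strong.contains item) with
        | true => simp
        | false =>
          simp only [Bool.false_eq_true, if_false]
          rw [pvAWeakLoop_weak (a :: l) (PySem.Dict.getD (PySem.Dict.mk rules) "weak_change" [])]
          decide
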